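-- pv_equiv track=rewrite | github.com/novdex/bob-agent | mind-clone/src/mind_clone/tools/browser.py | _generate_tool_chaining_hints
-- ===== SOURCE A (Python) =====
-- TOOL_CHAINING_HINTS_ENABLED = True
--
-- def _generate_tool_chaining_hints(user_message: str) -> list[str]:
--     if not TOOL_CHAINING_HINTS_ENABLED:
--         return []
--
--     text = (user_message or "").lower()
--     hints = []
--
--     if any(w in text for w in ("scrape", "scraping", "web page", "website content")):
--         hints.append("For web scraping: browser_open -> browser_get_text")
--     if any(w in text for w in ("login", "sign in", "authenticate")):
--         hints.append("For login: browser_open -> browser_type (user) -> browser_type (pass) -> browser_click (submit)")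
--     if any(w in text for w in ("screenshot", "capture", "visual")):
--         hints.append("For screenshots: browser_open -> browser_screenshot")
--     if any(w in text for w in ("fill form", "submit form", "form")):
--         hints.append("For forms: browser_open -> browser_type (fields) -> browser_click (submit)")
--     if any(w in text for w in ("download", "save file")):
--         hints.append("For downloads: browser_open -> browser_execute_js")
--     if any(w in text for w in ("research", "compare", "analysis")):
--         hints.append("For research: search_web -> browser_open -> browser_get_text")
--
--     return hints[:3]
-- ===== SOURCE B (Python) =====
-- TOOL_CHAINING_HINTS_ENABLED = True
--
-- _HINT_TABLE = (
--     (("scrape", "scraping", "web page", "website content"),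
--      "For web scraping: browser_open -> browser_get_text"),
--     (("login", "sign in", "authenticate"),
--      "For login: browser_open -> browser_type (user) -> browser_type (pass) -> browser_click (submit)"),
--     (("screenshot", "capture", "visual"),
--      "For screenshots: browser_open -> browser_screenshot"),
--     (("fill form", "submit form", "form"),
--      "For forms: browser_open -> browser_type (fields) -> browser_click (submit)"),
--     (("download", "save file"),
--      "For downloads: browser_open -> browser_execute_js"),
--     (("research", "compare", "analysis"),
--      "For research: search_web -> browser_open -> browser_get_text"),
-- )
--
-- def _generate_tool_chaining_hints(user_message: str) -> list[str]:
--     if not TOOL_CHAINING_HINTS_ENABLED: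
--         return []
--     text = (user_message or "").lower()
--
--     def collect(entries, remaining):
--         # stop as soon as 3 hints are found or the table is exhausted: no
--         # post-hoc slicing is ever needed
--         if remaining == 0 or not entries:
--             return []
--         keywords, hint = entries[0]
--         if any(w in text for w in keywords):
--             return [hint] + collect(entries[1:], remaining - 1)
--         return collect(entries[1:], remaining)
--
--     return collect(_HINT_TABLE, 3)
-- ===== Notes on version B (the rewrite author's own statement) =====
-- stated objective: alternative
-- what changed: Replaces six sequential if-branches appending to an accumulator plus a final [:3] slice with a recursive collector over an explicit keyword-to-hint table that carries a remaining-count and stops early the moment 3 hints are gathered, so no truncation step exists.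
import Mathlib
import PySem

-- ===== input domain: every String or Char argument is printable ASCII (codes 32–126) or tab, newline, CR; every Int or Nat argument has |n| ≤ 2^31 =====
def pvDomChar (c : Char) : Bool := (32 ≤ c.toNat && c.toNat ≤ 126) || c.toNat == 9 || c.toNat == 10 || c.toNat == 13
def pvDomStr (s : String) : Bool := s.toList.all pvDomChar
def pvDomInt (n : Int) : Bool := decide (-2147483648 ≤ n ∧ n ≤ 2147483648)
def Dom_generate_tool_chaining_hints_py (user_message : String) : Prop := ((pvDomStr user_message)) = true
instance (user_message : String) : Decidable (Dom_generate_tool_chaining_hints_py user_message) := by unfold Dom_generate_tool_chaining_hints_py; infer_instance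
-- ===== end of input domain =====

-- B replaces A's staged if-appends plus final [:3] slice by a recursive collector over a
-- keyword→hint table that counts down from 3 and stops early; same values, no truncation step.

-- ===== PORT A =====
def pvA_TOOL_CHAINING_HINTS_ENABLED : Bool := true

def generate_tool_chaining_hints_py (user_message : String) : List String :=
  if !pvA_TOOL_CHAINING_HINTS_ENABLED then [] else
  let text := PySem.Str.lower user_message
  let hints : List String := []
  let hints := if ["scrape", "scraping", "web page", "website content"].any (fun w => PySem.Str.isIn w text)
    then hints ++ ["For web scraping: browser_open -> browser_get_text"] else hints
  let hints := if ["login", "sign in", "authenticate"].any (fun w => PySem.Str.isIn w text)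
    then hints ++ ["For login: browser_open -> browser_type (user) -> browser_type (pass) -> browser_click (submit)"] else hints
  let hints := if ["screenshot", "capture", "visual"].any (fun w => PySem.Str.isIn w text)
    then hints ++ ["For screenshots: browser_open -> browser_screenshot"] else hints
  let hints := if ["fill form", "submit form", "form"].any (fun w => PySem.Str.isIn w text)
    then hints ++ ["For forms: browser_open -> browser_type (fields) -> browser_click (submit)"] else hints
  let hints := if ["download", "save file"].any (fun w => PySem.Str.isIn w text)
    then hints ++ ["For downloads: browser_open -> browser_execute_js"] else hints
  let hints := if ["research", "compare", "analysis"].any (fun w => PySem.Str.isIn w text)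
    then hints ++ ["For research: search_web -> browser_open -> browser_get_text"] else hints
  PySem.List.slice hints none (some 3)

-- ===== PORT B =====
def pvB_TOOL_CHAINING_HINTS_ENABLED : Bool := true

def pvB_hintTable : List (List String × String) :=
  [ (["scrape", "scraping", "web page", "website content"],
     "For web scraping: browser_open -> browser_get_text"),
    (["login", "sign in", "authenticate"],
     "For login: browser_open -> browser_type (user) -> browser_type (pass) -> browser_click (submit)"),
    (["screenshot", "capture", "visual"],
     "For screenshots: browser_open -> browser_screenshot"),
    (["fill form", "submit form", "form"],
     "For forms: browser_open -> browser_type (fields) -> browser_click (submit)"),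
    (["download", "save file"],
     "For downloads: browser_open -> browser_execute_js"),
    (["research", "compare", "analysis"],
     "For research: search_web -> browser_open -> browser_get_text") ]

-- B's inner 'collect': recursion over the table with a remaining-count, stopping early.
def pvB_collect (text : String) : List (List String × String) → Nat → List String
  | _, 0 => []
  | [], _ => []
  | (keywords, hint) :: rest, Nat.succ n =>
      if keywords.any (fun w => PySem.Str.isIn w text)
      then [hint] ++ pvB_collect text rest n
      else pvB_collect text rest (Nat.succ n)

def generate_tool_chaining_hints_py_alt (user_message : String) : List String :=
  if !pvB_TOOL_CHAINING_HINTS_ENABLED then [] else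
  let text := PySem.Str.lower user_message
  pvB_collect text pvB_hintTable 3

-- ===== PRECONDITION & SPEC =====
def Spec_generate_tool_chaining_hints_py (user_message : String) (out : List String) : Prop := out = generate_tool_chaining_hints_py_alt user_message
instance (user_message : String) (out : List String) : Decidable (Spec_generate_tool_chaining_hints_py user_message out) := by unfold Spec_generate_tool_chaining_hints_py; infer_instance

-- ===== CLAIM (what is proved, stated in full; the proofs are below) =====
def Claim_equal_generate_tool_chaining_hints_py : Prop := ∀ (user_message : String), Dom_generate_tool_chaining_hints_py user_message → Spec_generate_tool_chaining_hints_py user_message (generate_tool_chaining_hints_py user_message)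

-- ===== LEMMAS AND PROOFS =====

-- ===== VERDICT (by name: the statement is the Claim_ definition above) =====
theorem generate_tool_chaining_hints_py_spec : Claim_equal_generate_tool_chaining_hints_py := by
  intro u _
  unfold Spec_generate_tool_chaining_hints_py generate_tool_chaining_hints_py
    generate_tool_chaining_hints_py_alt pvA_TOOL_CHAINING_HINTS_ENABLED
    pvB_TOOL_CHAINING_HINTS_ENABLED pvB_hintTable
  simp only [Bool.not_true, Bool.false_eq_true, if_false]
  set t := PySem.Str.lower u with ht
  simp only [pvB_collect]
  generalize (["scrape", "scraping", "web page", "website content"].any (fun w => PySem.Str.isIn w t)) = b1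
  generalize (["login", "sign in", "authenticate"].any (fun w => PySem.Str.isIn w t)) = b2
  generalize (["screenshot", "capture", "visual"].any (fun w => PySem.Str.isIn w t)) = b3
  generalize (["fill form", "submit form", "form"].any (fun w => PySem.Str.isIn w t)) = b4
  generalize (["download", "save file"].any (fun w => PySem.Str.isIn w t)) = b5
  generalize (["research", "compare", "analysis"].any (fun w => PySem.Str.isIn w t)) = b6
  cases b1 <;> cases b2 <;> cases b3 <;> cases b4 <;> cases b5 <;> cases b6 <;> rfl
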